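-- pv_equiv track=rewrite | github.com/dkoh12/gamma | upvote/upvote.py | find_non_decreasing
-- ===== SOURCE A (Python) =====
-- def find_non_decreasing(window):
-- 	lst = [0] * len(window)
--
-- 	for start in range(len(window)):
-- 		temp = start
-- 		for curr in range(start+1, len(window)):
-- 			if window[curr] >= window[temp]:
-- 				temp = curr
-- 				lst[start] += 1
-- 			else:
-- 				break
--
-- 	return sum(lst)
-- ===== SOURCE B (Python) =====
-- def find_non_decreasing(window):
--     # One backward pass: run = length of the non-decreasing run starting here;
--     # run[i] = run[i+1] + 1 if window[i+1] >= window[i] else 0; answer is the sum.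
--     total = 0
--     run = 0
--     for i in range(len(window) - 2, -1, -1):
--         run = run + 1 if window[i + 1] >= window[i] else 0
--         total += run
--     return total
-- ===== Notes on version B (the rewrite author's own statement) =====
-- stated objective: faster
-- what changed: Replaced the nested rescan from every start index by a single backward dynamic-programming pass that extends the run length incrementally (run[i] = run[i+1]+1 or 0) and accumulates it.
import Mathlib
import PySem

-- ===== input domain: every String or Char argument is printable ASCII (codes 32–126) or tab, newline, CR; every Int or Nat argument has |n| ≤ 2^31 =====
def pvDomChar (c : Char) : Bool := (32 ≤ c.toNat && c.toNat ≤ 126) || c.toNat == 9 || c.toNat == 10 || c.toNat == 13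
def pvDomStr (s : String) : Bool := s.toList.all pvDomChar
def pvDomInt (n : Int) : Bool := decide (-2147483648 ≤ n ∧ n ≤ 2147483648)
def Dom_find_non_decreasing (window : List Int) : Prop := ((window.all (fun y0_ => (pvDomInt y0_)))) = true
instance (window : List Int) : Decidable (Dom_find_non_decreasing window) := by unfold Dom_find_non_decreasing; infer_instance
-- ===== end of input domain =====

-- B replaces A's O(n^2) rescan from every start by one backward O(n) DP pass (objective: faster).

-- ===== PORT A =====
-- inner 'for curr in range(start+1, len(window))' loop with its break; 'temp' is the
-- previous compared index. Indices come from pyRange over [0, len), so the pyGetD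
-- default 0 is never used (always in range).
def aInner (window : List Int) : Int → List Int → Int
  | _, [] => 0
  | temp, c :: rest =>
    if PySem.List.pyGetD window c 0 ≥ PySem.List.pyGetD window temp 0 then
      1 + aInner window c rest
    else 0

-- outer loop: lst[start] accumulated per start, summed at the end
def find_non_decreasing (window : List Int) : Int :=
  (PySem.List.pyRange 0 window.length 1).foldl
    (fun acc s => acc + aInner window s (PySem.List.pyRange (s + 1) window.length 1)) 0

-- ===== PORT B =====
-- the backward loop of Source B as structural recursion from the tail:
-- returns (run, total) for the suffix starting here
def altGo : List Int → Int × Int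
  | [] => (0, 0)
  | [_] => (0, 0)
  | a :: b :: t =>
    let p := altGo (b :: t)
    let r := if b ≥ a then p.1 + 1 else 0
    (r, p.2 + r)

def find_non_decreasing_alt (window : List Int) : Int := (altGo window).2

-- ===== PRECONDITION & SPEC =====
def Spec_find_non_decreasing (window : List Int) (out : Int) : Prop := out = find_non_decreasing_alt window
instance (window : List Int) (out : Int) : Decidable (Spec_find_non_decreasing window out) := by unfold Spec_find_non_decreasing; infer_instance

-- ===== CLAIM (what is proved, stated in full; the proofs are below) =====
def Claim_equal_find_non_decreasing : Prop := ∀ (window : List Int), Dom_find_non_decreasing window → Spec_find_non_decreasing window (find_non_decreasing window)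

-- ===== LEMMAS AND PROOFS =====

-- number of non-decreasing steps at the head of the list
def runLen : List Int → Int
  | [] => 0
  | [_] => 0
  | a :: b :: t => if b ≥ a then runLen (b :: t) + 1 else 0

-- sum of runLen over all suffixes
def sumRuns : List Int → Int
  | [] => 0
  | a :: t => runLen (a :: t) + sumRuns t

theorem altGo_eq (xs : List Int) : altGo xs = (runLen xs, sumRuns xs) := by
  match xs with
  | [] => rfl
  | [_] => simp [altGo, runLen, sumRuns]
  | a :: b :: t =>
    have ih := altGo_eq (b :: t)
    simp only [altGo, ih, runLen, sumRuns]
    split_ifs <;> simp <;> try ring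

theorem aInner_eq (xs : List Int) (k : Nat) (hk : k < xs.length) :
    aInner xs (k : Int) (PySem.List.pyRange ((k : Int) + 1) xs.length 1) = runLen (xs.drop k) := by
  by_cases h : k + 1 < xs.length
  · rw [show ((k : Int) + 1) = ((k + 1 : Nat) : Int) by push_cast; ring,
        PySem.List.pyRange_one_cons (by exact_mod_cast h)]
    have hd : xs.drop k = xs[k] :: xs.drop (k + 1) := List.drop_eq_getElem_cons hk
    have hd2 : xs.drop (k + 1) = xs[k + 1] :: xs.drop (k + 2) := List.drop_eq_getElem_cons h
    have ih := aInner_eq xs (k + 1) h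
    rw [show ((k + 1 : Nat) : Int) + 1 = ((k + 2 : Nat) : Int) by push_cast; ring] at ih ⊢
    simp only [aInner]
    rw [PySem.List.pyGetD_natCast, PySem.List.pyGetD_natCast,
        List.getD_eq_getElem _ _ h, List.getD_eq_getElem _ _ hk]
    rw [hd, hd2, runLen]
    split_ifs with hle
    · rw [ih, hd2, ← hd2]; ring
    · rfl
  · rw [PySem.List.pyRange_one_eq_nil (by omega)]
    have : xs.drop k = [xs[k]] := by
      have hd : xs.drop k = xs[k] :: xs.drop (k + 1) := List.drop_eq_getElem_cons hk
      rw [hd, List.drop_eq_nil_of_le (by omega)]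
    rw [this]; rfl
termination_by xs.length - k

theorem foldl_eq (xs : List Int) (k : Nat) (acc : Int) :
    (PySem.List.pyRange (k : Int) xs.length 1).foldl
      (fun acc s => acc + aInner xs s (PySem.List.pyRange (s + 1) xs.length 1)) acc
      = acc + sumRuns (xs.drop k) := by
  by_cases hk : k < xs.length
  · rw [PySem.List.pyRange_one_cons (by exact_mod_cast hk)]
    simp only [List.foldl_cons]
    rw [aInner_eq xs k hk,
        show ((k : Int) + 1) = ((k + 1 : Nat) : Int) by push_cast; ring,
        foldl_eq xs (k + 1)]
    have hd : xs.drop k = xs[k] :: xs.drop (k + 1) := List.drop_eq_getElem_cons hk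
    rw [hd, sumRuns, ← hd]
    ring
  · rw [PySem.List.pyRange_one_eq_nil (by exact_mod_cast Nat.le_of_not_lt hk)]
    rw [List.drop_eq_nil_of_le (by omega)]
    simp [sumRuns]
termination_by xs.length - k

-- ===== VERDICT (by name: the statement is the Claim_ definition above) =====
theorem find_non_decreasing_spec : Claim_equal_find_non_decreasing := by
  intro window _
  unfold Spec_find_non_decreasing find_non_decreasing find_non_decreasing_alt
  rw [altGo_eq]
  have := foldl_eq window 0 0
  simpa using this
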